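-- pv_equiv track=rewrite | github.com/noopur-zambare/Metropolis-Hastings-Algorithm | markov_chain.py | calculate_tile_adjacency_frequencies
-- ===== SOURCE A (Python) =====
-- def calculate_tile_adjacency_frequencies(level):
--     adjacency_frequencies_list = {}
--     occurrences = {}
--
--     for row in range(len(level)):
--         for col in range(len(level[0])):
--             tile = level[row][col]
--             occurrences[tile] = occurrences.get(tile, 0) + 1
--
--             if tile not in adjacency_frequencies_list:
--                 adjacency_frequencies_list[tile] = {}
--
--             for tile_offset in [(0, -1), (1, 0), (0, 1), (-1, 0)]:
--                 adjacent_row = row + tile_offset[1]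
--                 adjacent_col = col + tile_offset[0]
--
--                 if 0 <= adjacent_row < len(level) and 0 <= adjacent_col < len(level[0]):
--                     adjacent_tile = level[adjacent_row][adjacent_col]
--                     adjacency_frequencies_list[tile][adjacent_tile] = (
--                         adjacency_frequencies_list[tile].get(adjacent_tile, 0) + 1
--                     )
--
--     return adjacency_frequencies_list, occurrences
-- ===== SOURCE B (Python) =====
-- def calculate_tile_adjacency_frequencies(level):
--     width = len(level[0]) if level else 0
--     tiles = [level[r][c] for r in range(len(level)) for c in range(width)]
--     events = [(level[r][c], level[r + dr][c + dc])
--               for r in range(len(level)) for c in range(width)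
--               for dc, dr in ((0, -1), (1, 0), (0, 1), (-1, 0))
--               if 0 <= r + dr < len(level) and 0 <= c + dc < width]
--     occurrences = {t: tiles.count(t) for t in dict.fromkeys(tiles)}
--     adjacency = {t: {b: events.count((t, b))
--                      for b in dict.fromkeys(b2 for a, b2 in events if a == t)}
--                  for t in dict.fromkeys(tiles)}
--     return adjacency, occurrences
-- ===== Notes on version B (the rewrite author's own statement) =====
-- stated objective: alternative
-- what changed: Replaces A's single-pass incremental dict mutation (per-cell get/insert increments into nested dicts) by a declarative counting construction: flatten the grid into a tile stream and a directed adjacency-event stream, then build each result dict by comprehension over the dedup'd keys with list.count supplying every value — no dict is ever updated.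
import Mathlib
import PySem

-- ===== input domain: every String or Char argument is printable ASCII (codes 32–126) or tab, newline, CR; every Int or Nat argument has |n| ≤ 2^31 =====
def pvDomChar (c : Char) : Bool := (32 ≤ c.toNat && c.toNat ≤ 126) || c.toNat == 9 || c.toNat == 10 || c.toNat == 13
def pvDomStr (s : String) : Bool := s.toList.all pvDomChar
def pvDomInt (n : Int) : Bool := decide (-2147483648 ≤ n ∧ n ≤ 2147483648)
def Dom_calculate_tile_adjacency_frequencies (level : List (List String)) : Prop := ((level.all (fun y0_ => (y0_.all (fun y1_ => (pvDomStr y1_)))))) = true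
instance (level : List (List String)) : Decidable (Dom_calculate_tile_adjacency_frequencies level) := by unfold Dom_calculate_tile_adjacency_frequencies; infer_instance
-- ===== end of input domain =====

-- B replaces A's single-pass incremental nested-dict mutation by a declarative counting
-- construction (dedup'd key streams + list.count for every value); alternative decomposition,
-- quadratic rather than linear, no speed claim.


-- ===== PORT A =====
def calculate_tile_adjacency_frequencies (level : List (List String)) : (List (String × List (String × Int))) × (List (String × Int)) :=
  let st :=
    (PySem.List.pyRange 0 (level.length : Int) 1).foldl (fun st row =>
      (PySem.List.pyRange 0 ((PySem.List.pyGetD level 0 []).length : Int) 1).foldl (fun st col =>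
        let tile := PySem.List.pyGetD (PySem.List.pyGetD level row []) col ""
        (([((0:Int),(-1:Int)), (1,0), (0,1), (-1,0)].foldl (fun adj off =>
            if 0 ≤ row + off.2 ∧ row + off.2 < (level.length : Int) ∧
               0 ≤ col + off.1 ∧ col + off.1 < ((PySem.List.pyGetD level 0 []).length : Int) then
              let adjacent := PySem.List.pyGetD (PySem.List.pyGetD level (row + off.2) []) (col + off.1) ""
              let inner := adj.getD tile PySem.Dict.empty
              adj.insert tile (inner.insert adjacent (inner.getD adjacent 0 + 1))
            else adj)
            (if st.1.contains tile then st.1 else st.1.insert tile PySem.Dict.empty)),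
         st.2.insert tile (st.2.getD tile 0 + 1))) st)
      ((PySem.Dict.empty : PySem.Dict String (PySem.Dict String Int)), (PySem.Dict.empty : PySem.Dict String Int))
  (st.1.items.map (fun p => (p.1, p.2.items)), st.2.items)

-- ===== PORT B =====
-- dict.fromkeys(...) as ordered dedup is PySem.List.dedup; each dict comprehension (whose key
-- stream is already deduplicated) is its items list: map over the dedup'd keys.
def calculate_tile_adjacency_frequencies_alt (level : List (List String)) : (List (String × List (String × Int))) × (List (String × Int)) :=
  let width : Int := if level = [] then 0 else ((PySem.List.pyGetD level 0 []).length : Int)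
  let tiles := (PySem.List.pyRange 0 (level.length : Int) 1).flatMap (fun r =>
      (PySem.List.pyRange 0 width 1).map (fun c =>
        PySem.List.pyGetD (PySem.List.pyGetD level r []) c ""))
  let events := (PySem.List.pyRange 0 (level.length : Int) 1).flatMap (fun r =>
      (PySem.List.pyRange 0 width 1).flatMap (fun c =>
        ([((0:Int),(-1:Int)), (1,0), (0,1), (-1,0)]).filterMap (fun dd =>
          if 0 ≤ r + dd.2 ∧ r + dd.2 < (level.length : Int) ∧ 0 ≤ c + dd.1 ∧ c + dd.1 < width then
            some (PySem.List.pyGetD (PySem.List.pyGetD level r []) c "",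
                  PySem.List.pyGetD (PySem.List.pyGetD level (r + dd.2) []) (c + dd.1) "")
          else none)))
  let occurrences := (PySem.List.dedup tiles).map (fun t => (t, (tiles.count t : Int)))
  let adjacency := (PySem.List.dedup tiles).map (fun t =>
      (t, (PySem.List.dedup ((events.filter (fun e => e.1 == t)).map (·.2))).map
            (fun b => (b, (events.count (t, b) : Int)))))
  (adjacency, occurrences)

-- ===== PRECONDITION & SPEC =====
-- Pre_ excludes exactly the grids on which Python A raises IndexError: some row shorter than row 0
-- (A indexes every row at all columns 0..len(level[0])-1).
def Pre_calculate_tile_adjacency_frequencies (level : List (List String)) : Prop :=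
  ∀ row ∈ level, (level.headD []).length ≤ row.length
instance (level : List (List String)) : Decidable (Pre_calculate_tile_adjacency_frequencies level) := by unfold Pre_calculate_tile_adjacency_frequencies; infer_instance
def pvWitness_calculate_tile_adjacency_frequencies : List (List String) := [["a", "b"], ["b", "a"]]
def Spec_calculate_tile_adjacency_frequencies (level : List (List String)) (out : (List (String × List (String × Int))) × (List (String × Int))) : Prop := out = calculate_tile_adjacency_frequencies_alt level
instance (level : List (List String)) (out : (List (String × List (String × Int))) × (List (String × Int))) : Decidable (Spec_calculate_tile_adjacency_frequencies level out) := by unfold Spec_calculate_tile_adjacency_frequencies; infer_instance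

-- ===== CLAIM (what is proved, stated in full; the proofs are below) =====
def Claim_equal_calculate_tile_adjacency_frequencies : Prop := ∀ (level : List (List String)), Dom_calculate_tile_adjacency_frequencies level → Pre_calculate_tile_adjacency_frequencies level → Spec_calculate_tile_adjacency_frequencies level (calculate_tile_adjacency_frequencies level)

-- ===== LEMMAS AND PROOFS =====

-- canonical pieces shared by the two ports (proof-only helpers)
def pvTile (level : List (List String)) (rc : Int × Int) : String :=
  PySem.List.pyGetD (PySem.List.pyGetD level rc.1 []) rc.2 ""

def pvEvs (level : List (List String)) (H W : Int) (rc : Int × Int) : List (String × String) :=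
  ([((0:Int),(-1:Int)), (1,0), (0,1), (-1,0)]).filterMap (fun dd =>
    if 0 ≤ rc.1 + dd.2 ∧ rc.1 + dd.2 < H ∧ 0 ≤ rc.2 + dd.1 ∧ rc.2 + dd.1 < W then
      some (pvTile level rc, pvTile level (rc.1 + dd.2, rc.2 + dd.1))
    else none)

def pvInc (d : PySem.Dict String (PySem.Dict String Int)) (e : String × String) : PySem.Dict String (PySem.Dict String Int) :=
  d.insert e.1 ((d.getD e.1 PySem.Dict.empty).insert e.2 ((d.getD e.1 PySem.Dict.empty).getD e.2 0 + 1))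

def pvCells (H W : Int) : List (Int × Int) :=
  (PySem.List.pyRange 0 H 1).flatMap (fun r => (PySem.List.pyRange 0 W 1).map (fun c => (r, c)))

def pvF (level : List (List String)) (H W : Int)
    (a : PySem.Dict String (PySem.Dict String Int)) (rc : Int × Int) : PySem.Dict String (PySem.Dict String Int) :=
  (pvEvs level H W rc).foldl pvInc (a.setdefault (pvTile level rc) PySem.Dict.empty)

def pvG (level : List (List String)) (d : PySem.Dict String Int) (rc : Int × Int) : PySem.Dict String Int :=
  d.insert (pvTile level rc) (d.getD (pvTile level rc) 0 + 1)

-- if-contains = setdefault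
theorem pv_if_setdefault {ν : Type} (d : PySem.Dict String ν) (t : String) (v : ν) :
    (if d.contains t then d else d.insert t v) = d.setdefault t v := by
  by_cases h : d.contains t = true
  · simp [h, PySem.Dict.setdefault_of_contains d v h]
  · simp at h
    simp [h, PySem.Dict.setdefault_of_not_contains d v h]

theorem pv_contains_pvInc (d : PySem.Dict String (PySem.Dict String Int)) (e : String × String)
    (k : String) (h : d.contains k = true) : (pvInc d e).contains k = true := by
  simp [pvInc, PySem.Dict.contains_insert, h]

-- single commute: a setdefault moves left past an inc whose source key is present
theorem pv_C1 (d : PySem.Dict String (PySem.Dict String Int)) (e : String × String) (t : String)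
    (h : d.contains e.1 = true) :
    (pvInc d e).setdefault t PySem.Dict.empty = pvInc (d.setdefault t PySem.Dict.empty) e := by
  by_cases hct : d.contains t = true
  · rw [PySem.Dict.setdefault_of_contains _ _ hct,
        PySem.Dict.setdefault_of_contains _ _ (pv_contains_pvInc d e t hct)]
  · simp only [Bool.not_eq_true] at hct
    have hne : t ≠ e.1 := fun hq => by rw [hq] at hct; rw [h] at hct; cases hct
    have h1 : (pvInc d e).contains t = false := by
      simp [pvInc, PySem.Dict.contains_insert, hct, hne]
    rw [PySem.Dict.setdefault_of_not_contains _ _ h1,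
        PySem.Dict.setdefault_of_not_contains _ _ hct]
    unfold pvInc
    rw [PySem.Dict.getD_insert_of_ne d _ _ (Ne.symm hne)]
    apply PySem.Dict.ext
    have hc2 : ∀ v : PySem.Dict String Int, (d.insert e.1 v).contains t = false := fun v => by
      simp [PySem.Dict.contains_insert, hct, hne]
    rw [PySem.Dict.items_insert_of_not_contains _ _ (hc2 _),
        PySem.Dict.items_insert_of_contains _ _ h]
    have hc3 : (d.insert t PySem.Dict.empty).contains e.1 = true := by
      simp [PySem.Dict.contains_insert, h]
    rw [PySem.Dict.items_insert_of_contains _ _ hc3,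
        PySem.Dict.items_insert_of_not_contains _ _ hct]
    simp [List.map_append]
    exact fun hq => absurd hq hne

-- a setdefault moves left past a fold of incs whose sources are present
theorem pv_C2 (E : List (String × String)) :
    ∀ d : PySem.Dict String (PySem.Dict String Int), ∀ t : String,
    (∀ e ∈ E, d.contains e.1 = true) →
    (E.foldl pvInc d).setdefault t PySem.Dict.empty
      = E.foldl pvInc (d.setdefault t PySem.Dict.empty) := by
  induction E with
  | nil => intro d t _; rfl
  | cons e E ih =>
    intro d t hsrc
    simp only [List.foldl_cons]
    rw [ih (pvInc d e) t (fun e' he' => pv_contains_pvInc d e e'.1 (hsrc e' (List.mem_cons_of_mem _ he'))),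
        pv_C1 d e t (hsrc e (List.mem_cons_self ..))]

theorem pv_contains_setdefault_mono {ν : Type} (d : PySem.Dict String ν) (t k : String) (v : ν)
    (h : d.contains k = true) : (d.setdefault t v).contains k = true := by
  simp [PySem.Dict.contains_setdefault, h]

-- a fold of setdefaults moves left past a fold of incs whose sources are present
theorem pv_COMM (ts : List String) :
    ∀ (E : List (String × String)) (d : PySem.Dict String (PySem.Dict String Int)),
    (∀ e ∈ E, d.contains e.1 = true) →
    ts.foldl (fun a t => a.setdefault t PySem.Dict.empty) (E.foldl pvInc d)
      = E.foldl pvInc (ts.foldl (fun a t => a.setdefault t PySem.Dict.empty) d) := by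
  induction ts with
  | nil => intro E d _; rfl
  | cons t ts ih =>
    intro E d hsrc
    simp only [List.foldl_cons]
    rw [pv_C2 E d t hsrc]
    exact ih E _ (fun e he => pv_contains_setdefault_mono _ _ _ _ (hsrc e he))

theorem pv_evs_src (level : List (List String)) (H W : Int) (rc : Int × Int) :
    ∀ e ∈ pvEvs level H W rc, e.1 = pvTile level rc := by
  intro e he
  simp only [pvEvs, List.mem_filterMap] at he
  obtain ⟨dd, _, hdd⟩ := he
  split at hdd
  · cases hdd; rfl
  · cases hdd

-- interleaved (init-then-incs per cell) = all inits first, then all incs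
theorem pv_MAIN (level : List (List String)) (H W : Int) (cells : List (Int × Int)) :
    ∀ d : PySem.Dict String (PySem.Dict String Int),
    cells.foldl (fun a rc => (pvEvs level H W rc).foldl pvInc (a.setdefault (pvTile level rc) PySem.Dict.empty)) d
      = (cells.flatMap (pvEvs level H W)).foldl pvInc
          (cells.foldl (fun a rc => a.setdefault (pvTile level rc) PySem.Dict.empty) d) := by
  induction cells with
  | nil => intro d; rfl
  | cons rc cs ih =>
    intro d
    simp only [List.foldl_cons, List.flatMap_cons, List.foldl_append]
    rw [ih ((pvEvs level H W rc).foldl pvInc (d.setdefault (pvTile level rc) PySem.Dict.empty))]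
    congr 1
    rw [← List.foldl_map (f := fun rc' : Int × Int => pvTile level rc')
          (g := fun a t => PySem.Dict.setdefault a t PySem.Dict.empty) (l := cs),
        pv_COMM, List.foldl_map]
    intro e he
    rw [pv_evs_src level H W rc e he]
    simp [PySem.Dict.contains_setdefault]

theorem pv_offsfold (level : List (List String)) (H W row col : Int)
    (a : PySem.Dict String (PySem.Dict String Int)) :
    [((0:Int),(-1:Int)), (1,0), (0,1), (-1,0)].foldl (fun adj off =>
      if 0 ≤ row + off.2 ∧ row + off.2 < H ∧ 0 ≤ col + off.1 ∧ col + off.1 < W then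
        adj.insert (PySem.List.pyGetD (PySem.List.pyGetD level row []) col "")
          ((adj.getD (PySem.List.pyGetD (PySem.List.pyGetD level row []) col "") PySem.Dict.empty).insert
            (PySem.List.pyGetD (PySem.List.pyGetD level (row + off.2) []) (col + off.1) "")
            ((adj.getD (PySem.List.pyGetD (PySem.List.pyGetD level row []) col "") PySem.Dict.empty).getD
              (PySem.List.pyGetD (PySem.List.pyGetD level (row + off.2) []) (col + off.1) "") 0 + 1))
      else adj) a
    = (pvEvs level H W (row, col)).foldl pvInc a := by
  simp only [pvEvs, List.foldl_filterMap, pvTile, pvInc, List.foldl_cons, List.foldl_nil]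
  split_ifs <;> rfl

theorem pvA_canon (level : List (List String)) :
    calculate_tile_adjacency_frequencies level =
      (((pvCells (level.length : Int) ((PySem.List.pyGetD level 0 []).length : Int)).foldl
          (pvF level (level.length : Int) ((PySem.List.pyGetD level 0 []).length : Int))
          PySem.Dict.empty).items.map (fun p => (p.1, p.2.items)),
       ((pvCells (level.length : Int) ((PySem.List.pyGetD level 0 []).length : Int)).foldl
          (pvG level) PySem.Dict.empty).items) := by
  simp only [calculate_tile_adjacency_frequencies]
  have hstep : ∀ row : Int,
      (fun (st : PySem.Dict String (PySem.Dict String Int) × PySem.Dict String Int) (col : Int) =>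
        (([((0:Int),(-1:Int)), (1,0), (0,1), (-1,0)].foldl (fun adj off =>
            if 0 ≤ row + off.2 ∧ row + off.2 < (level.length : Int) ∧
               0 ≤ col + off.1 ∧ col + off.1 < ((PySem.List.pyGetD level 0 []).length : Int) then
              adj.insert (PySem.List.pyGetD (PySem.List.pyGetD level row []) col "")
                ((adj.getD (PySem.List.pyGetD (PySem.List.pyGetD level row []) col "") PySem.Dict.empty).insert
                  (PySem.List.pyGetD (PySem.List.pyGetD level (row + off.2) []) (col + off.1) "")
                  ((adj.getD (PySem.List.pyGetD (PySem.List.pyGetD level row []) col "") PySem.Dict.empty).getD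
                    (PySem.List.pyGetD (PySem.List.pyGetD level (row + off.2) []) (col + off.1) "") 0 + 1))
            else adj)
            (if st.1.contains (PySem.List.pyGetD (PySem.List.pyGetD level row []) col "") then st.1
             else st.1.insert (PySem.List.pyGetD (PySem.List.pyGetD level row []) col "") PySem.Dict.empty)),
         st.2.insert (PySem.List.pyGetD (PySem.List.pyGetD level row []) col "")
           (st.2.getD (PySem.List.pyGetD (PySem.List.pyGetD level row []) col "") 0 + 1)))
      = (fun st col =>
          (pvF level (level.length : Int) ((PySem.List.pyGetD level 0 []).length : Int) st.1 (row, col),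
           pvG level st.2 (row, col))) := by
    intro row
    funext st col
    rw [pv_if_setdefault, pv_offsfold]
    simp [pvF, pvG, pvTile]
  have hflat :
      (PySem.List.pyRange 0 (level.length : Int) 1).foldl (fun st row =>
        (PySem.List.pyRange 0 ((PySem.List.pyGetD level 0 []).length : Int) 1).foldl
          (fun st col =>
            (pvF level (level.length : Int) ((PySem.List.pyGetD level 0 []).length : Int) st.1 (row, col),
             pvG level st.2 (row, col))) st)
        ((PySem.Dict.empty : PySem.Dict String (PySem.Dict String Int)), (PySem.Dict.empty : PySem.Dict String Int))
      = (pvCells (level.length : Int) ((PySem.List.pyGetD level 0 []).length : Int)).foldl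
          (fun st rc =>
            (pvF level (level.length : Int) ((PySem.List.pyGetD level 0 []).length : Int) st.1 rc,
             pvG level st.2 rc))
          ((PySem.Dict.empty : PySem.Dict String (PySem.Dict String Int)), (PySem.Dict.empty : PySem.Dict String Int)) := by
    rw [pvCells, List.foldl_flatMap]
    simp only [List.foldl_map]
  simp only [hstep, hflat,
    PySem.List.foldl_prod_mk
      (pvF level (level.length : Int) ((PySem.List.pyGetD level 0 []).length : Int)) (pvG level)]

-- ===== new B-side lemmas =====

theorem pv_contains_eq_keys_contains {ν : Type} (d : PySem.Dict String ν) (k : String) :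
    d.contains k = d.keys.contains k := by
  by_cases h : d.contains k = true
  · rw [h]; symm
    simpa [List.contains_iff_mem] using (PySem.Dict.contains_iff_mem_keys d k).mp h
  · simp only [Bool.not_eq_true] at h; rw [h]; symm
    simp only [Bool.eq_false_iff, ne_eq, List.contains_iff_mem]
    intro hm
    rw [(PySem.Dict.contains_iff_mem_keys d k).mpr hm] at h; cases h

theorem pv_keys_setdef_fold {ν : Type} (ts : List String) (v : ν) :
    ∀ d : PySem.Dict String ν,
    (ts.foldl (fun a t => a.setdefault t v) d).keys = PySem.Set.update d.keys ts := by
  induction ts with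
  | nil => intro d; rfl
  | cons t ts ih =>
    intro d
    simp only [List.foldl_cons, PySem.Set.update, ih]
    congr 1
    rw [PySem.Dict.keys_setdefault, pv_contains_eq_keys_contains]
    rfl

-- getD of a setdefault-∅ fold is always ∅
theorem pv_getD_setdef_fold (ts : List String) :
    ∀ (d : PySem.Dict String (PySem.Dict String Int)) (t : String),
    d.getD t PySem.Dict.empty = PySem.Dict.empty →
    (ts.foldl (fun a x => a.setdefault x PySem.Dict.empty) d).getD t PySem.Dict.empty = PySem.Dict.empty := by
  induction ts with
  | nil => intro d t h; exact h
  | cons x ts ih =>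
    intro d t h
    simp only [List.foldl_cons]
    apply ih
    by_cases hc : d.contains x = true
    · rw [PySem.Dict.setdefault_of_contains _ _ hc]; exact h
    · simp only [Bool.not_eq_true] at hc
      rw [PySem.Dict.setdefault_of_not_contains _ _ hc]
      by_cases ht : t = x
      · subst ht; rw [PySem.Dict.getD_insert_self]
      · rw [PySem.Dict.getD_insert_of_ne _ _ _ ht]; exact h

-- the inner dict at key t after the event fold is the counter of t's neighbour stream
theorem pv_getD_inc_fold (E : List (String × String)) :
    ∀ (d : PySem.Dict String (PySem.Dict String Int)) (t : String),
    (E.foldl pvInc d).getD t PySem.Dict.empty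
      = ((E.filter (fun e => e.1 == t)).map (·.2)).foldl
          (fun m b => m.insert b (m.getD b 0 + 1)) (d.getD t PySem.Dict.empty) := by
  induction E with
  | nil => intro d t; rfl
  | cons e E ih =>
    intro d t
    simp only [List.foldl_cons, List.filter_cons]
    by_cases he : e.1 = t
    · subst he
      have hb : (e.1 == e.1) = true := by simp
      simp only [hb, if_true, List.map_cons, List.foldl_cons, ih]
      congr 1
      unfold pvInc
      rw [PySem.Dict.getD_insert_self]
    · have hb : (e.1 == t) = false := by simp [he]
      simp only [hb, Bool.false_eq_true, if_false, ih]
      congr 1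
      unfold pvInc
      rw [PySem.Dict.getD_insert_of_ne _ _ _ (fun hq => he hq.symm)]

-- counting a directed pair in the event list = counting the target in t's filtered stream
theorem pv_count_pair (E : List (String × String)) (t b : String) :
    ((E.filter (fun e => e.1 == t)).map (·.2)).count b = E.count (t, b) := by
  simp only [List.count, List.countP_map, List.countP_filter]
  apply List.countP_congr
  intro e _
  cases e with
  | mk x y => simp [Function.comp, and_comm]

-- Set.update adds nothing when every element is already present
theorem pv_update_of_subset (s : PySem.Set String) (xs : List String)
    (h : ∀ x ∈ xs, x ∈ s) : PySem.Set.update s xs = s := by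
  rw [PySem.Set.update_eq_append_filter]
  have : (PySem.Set.ofList xs).filter (fun y => !(PySem.Set.contains s y)) = [] := by
    apply List.filter_eq_nil_iff.mpr
    intro y hy
    have : y ∈ xs := (PySem.Set.mem_ofList xs y).mp hy
    simp [PySem.Set.contains, h y this]
  rw [this, List.append_nil]

def pvTiles (level : List (List String)) (H W : Int) : List String :=
  (pvCells H W).map (pvTile level)

def pvE (level : List (List String)) (H W : Int) : List (String × String) :=
  (pvCells H W).flatMap (pvEvs level H W)

-- B in canonical vocabulary
theorem pvB_canon (level : List (List String)) (h : level ≠ []) :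
    calculate_tile_adjacency_frequencies_alt level =
      ((PySem.Set.ofList (pvTiles level (level.length : Int) ((PySem.List.pyGetD level 0 []).length : Int))).map
         (fun t => (t,
           (PySem.Set.ofList (((pvE level (level.length : Int) ((PySem.List.pyGetD level 0 []).length : Int)).filter
               (fun e => e.1 == t)).map (·.2))).map
             (fun b => (b, ((pvE level (level.length : Int) ((PySem.List.pyGetD level 0 []).length : Int)).count (t, b) : Int))))),
       (PySem.Set.ofList (pvTiles level (level.length : Int) ((PySem.List.pyGetD level 0 []).length : Int))).map
         (fun t => (t, ((pvTiles level (level.length : Int) ((PySem.List.pyGetD level 0 []).length : Int)).count t : Int)))) := by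
  have htiles : (PySem.List.pyRange 0 (level.length : Int) 1).flatMap (fun r =>
      (PySem.List.pyRange 0 ((PySem.List.pyGetD level 0 []).length : Int) 1).map (fun c =>
        PySem.List.pyGetD (PySem.List.pyGetD level r []) c ""))
      = pvTiles level (level.length : Int) ((PySem.List.pyGetD level 0 []).length : Int) := by
    rw [pvTiles, pvCells, List.map_flatMap]
    simp only [List.map_map]
    rfl
  have hevents : (PySem.List.pyRange 0 (level.length : Int) 1).flatMap (fun r =>
      (PySem.List.pyRange 0 ((PySem.List.pyGetD level 0 []).length : Int) 1).flatMap (fun c =>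
        ([((0:Int),(-1:Int)), (1,0), (0,1), (-1,0)]).filterMap (fun dd =>
          if 0 ≤ r + dd.2 ∧ r + dd.2 < (level.length : Int) ∧ 0 ≤ c + dd.1 ∧
              c + dd.1 < ((PySem.List.pyGetD level 0 []).length : Int) then
            some (PySem.List.pyGetD (PySem.List.pyGetD level r []) c "",
                  PySem.List.pyGetD (PySem.List.pyGetD level (r + dd.2) []) (c + dd.1) "")
          else none)))
      = pvE level (level.length : Int) ((PySem.List.pyGetD level 0 []).length : Int) := by
    rw [pvE, pvCells, List.flatMap_assoc]
    simp only [List.flatMap_map]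
    rfl
  simp only [calculate_tile_adjacency_frequencies_alt, if_neg h, htiles, hevents,
    PySem.List.dedup_eq_ofList]

-- every event source is a tile of the grid
theorem pv_src_mem_tiles (level : List (List String)) (H W : Int) :
    ∀ e ∈ pvE level H W, e.1 ∈ pvTiles level H W := by
  intro e he
  rw [pvE, List.mem_flatMap] at he
  obtain ⟨rc, hrc, hev⟩ := he
  rw [pv_evs_src level H W rc e hev, pvTiles]
  exact List.mem_map_of_mem hrc

-- A in B's canonical vocabulary (nonempty grids)
theorem pvAB (level : List (List String)) (h : level ≠ []) :
    calculate_tile_adjacency_frequencies level = calculate_tile_adjacency_frequencies_alt level := by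
  rw [pvA_canon, pvB_canon level h]
  have hT : (pvCells (level.length : Int) ((PySem.List.pyGetD level 0 []).length : Int)).map (pvTile level)
      = pvTiles level (level.length : Int) ((PySem.List.pyGetD level 0 []).length : Int) := rfl
  refine Prod.ext ?_ ?_
  · -- adjacency component
    show ((pvCells (level.length : Int) ((PySem.List.pyGetD level 0 []).length : Int)).foldl
        (pvF level (level.length : Int) ((PySem.List.pyGetD level 0 []).length : Int))
        PySem.Dict.empty).items.map (fun p => (p.1, p.2.items)) = _
    rw [show pvF level (level.length : Int) ((PySem.List.pyGetD level 0 []).length : Int)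
          = (fun d rc => (pvEvs level (level.length : Int)
              ((PySem.List.pyGetD level 0 []).length : Int) rc).foldl pvInc
                (d.setdefault (pvTile level rc) PySem.Dict.empty)) from rfl,
        pv_MAIN]
    have hd0 : (pvCells (level.length : Int) ((PySem.List.pyGetD level 0 []).length : Int)).foldl
        (fun (a : PySem.Dict String (PySem.Dict String Int)) rc =>
          a.setdefault (pvTile level rc) PySem.Dict.empty) PySem.Dict.empty
        = (pvTiles level (level.length : Int) ((PySem.List.pyGetD level 0 []).length : Int)).foldl
            (fun (a : PySem.Dict String (PySem.Dict String Int)) t =>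
              a.setdefault t PySem.Dict.empty) PySem.Dict.empty := by
      rw [← hT, List.foldl_map]
    rw [hd0]
    set H := ((level.length : Nat) : Int) with hH
    set W := (((PySem.List.pyGetD level 0 []).length : Nat) : Int) with hW
    set ts := pvTiles level H W with hts
    set E := pvE level H W with hE
    set d0 := ts.foldl (fun a t => a.setdefault t PySem.Dict.empty)
        (PySem.Dict.empty : PySem.Dict String (PySem.Dict String Int)) with hd0def
    have hkeys0 : d0.keys = PySem.Set.ofList ts := by
      rw [hd0def, pv_keys_setdef_fold]
      rw [show (PySem.Dict.empty : PySem.Dict String (PySem.Dict String Int)).keys = ([] : List String) from rfl]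
      rw [PySem.Set.update_nil_left]
    have hflat : E = pvE level H W := hE
    have hDfinkeys : (E.foldl pvInc d0).keys = PySem.Set.ofList ts := by
      rw [show pvInc = (fun (d : PySem.Dict String (PySem.Dict String Int)) (e : String × String) =>
            d.insert e.1 ((fun d e => ((d.getD e.1 PySem.Dict.empty).insert e.2
              ((d.getD e.1 PySem.Dict.empty).getD e.2 0 + 1))) d e)) from rfl,
          PySem.Dict.keys_foldl_insert_key, hkeys0]
      apply pv_update_of_subset
      intro x hx
      rw [List.mem_map] at hx
      obtain ⟨e, he, hxe⟩ := hx
      rw [← hxe]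
      exact (PySem.Set.mem_ofList ts e.1).mpr (pv_src_mem_tiles level H W e (hflat ▸ he))
    have hnd : (E.foldl pvInc d0).keys.Nodup := by
      rw [hDfinkeys]; exact PySem.Set.nodup_ofList ts
    rw [show List.flatMap (pvEvs level H W) (pvCells H W) = E from rfl]
    show (E.foldl pvInc d0).items.map (fun p => (p.1, p.2.items))
        = (PySem.Set.ofList ts).map (fun t => (t,
            (PySem.Set.ofList ((E.filter (fun e => e.1 == t)).map (·.2))).map
              (fun b => (b, (E.count (t, b) : Int)))))
    rw [PySem.Dict.items_eq_map_keys _ hnd PySem.Dict.empty, hDfinkeys, List.map_map]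
    apply List.map_congr_left
    intro t _
    show (t, ((E.foldl pvInc d0).getD t PySem.Dict.empty).items)
        = (t, (PySem.Set.ofList ((E.filter (fun e => e.1 == t)).map (·.2))).map
            (fun b => (b, (E.count (t, b) : Int))))
    have hg0 : d0.getD t PySem.Dict.empty = PySem.Dict.empty := by
      rw [hd0def]
      exact pv_getD_setdef_fold ts PySem.Dict.empty t (PySem.Dict.getD_empty ..)
    have : (E.foldl pvInc d0).getD t PySem.Dict.empty
        = PySem.Dict.counter ((E.filter (fun e => e.1 == t)).map (·.2)) := by
      rw [pv_getD_inc_fold, hg0, PySem.Dict.foldl_insert_getD_add_one_eq_counter]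
    rw [this, PySem.Dict.items_counter]
    refine congrArg _ (List.map_congr_left ?_)
    intro b _
    rw [pv_count_pair]
  · -- occurrences component
    show ((pvCells (level.length : Int) ((PySem.List.pyGetD level 0 []).length : Int)).foldl
        (pvG level) PySem.Dict.empty).items = _
    have : (pvCells (level.length : Int) ((PySem.List.pyGetD level 0 []).length : Int)).foldl
        (pvG level) PySem.Dict.empty
        = PySem.Dict.counter (pvTiles level (level.length : Int) ((PySem.List.pyGetD level 0 []).length : Int)) := by
      rw [← PySem.Dict.foldl_insert_getD_add_one_eq_counter, ← hT, List.foldl_map]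
      rfl
    rw [this, PySem.Dict.items_counter]

-- ===== VERDICT (by name: the statement is the Claim_ definition above) =====
theorem calculate_tile_adjacency_frequencies_spec : Claim_equal_calculate_tile_adjacency_frequencies := by
  intro level _ _
  unfold Spec_calculate_tile_adjacency_frequencies
  cases level with
  | nil => rfl
  | cons a as => exact pvAB (a :: as) (by simp)
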